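-- pv_equiv track=rewrite | github.com/stevenotts2012-rgb/looparchitect-backend-api | app/services/groove_engine/accent_engine.py | _snare_emphasis_bars
-- ===== SOURCE A (Python) =====
-- from typing import List
--
-- def _snare_emphasis_bars(bars: int, section_type: str, occurrence: int) -> List[int]:
--     """Return bars where snare receives extra emphasis.
--
--     Snare emphasis follows a downbeat-of-phrase pattern — every 4 bars,
--     shifted by section type and occurrence for variation.
--     """
--     emphasis_bars = []
--     # Standard snare accent every 4 bars starting at bar 3 or 4
--     base_bar = 3 if section_type in ("hook", "pre_hook") else 4
--     offset = (occurrence - 1) % 4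
--
--     for bar in range(1, bars + 1):
--         adjusted = bar - offset
--         if adjusted > 0 and (adjusted - base_bar) % 4 == 0:
--             emphasis_bars.append(bar)
--
--     return emphasis_bars
-- ===== SOURCE B (Python) =====
-- def _snare_emphasis_bars(bars: int, section_type: str, occurrence: int):
--     """Closed form: compute the count of emphasised bars, then list-comprehend them."""
--     start = (3 if section_type in ("hook", "pre_hook") else 4) + (occurrence - 1) % 4
--     if bars < start:
--         return []
--     n = (bars - start) // 4 + 1
--     return [start + 4 * k for k in range(n)]
-- ===== Notes on version B (the rewrite author's own statement) =====
-- stated objective: simpler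
-- what changed: Replaces A's per-bar loop with a modular test by a closed form: computes the first emphasis bar and the count of emphasis bars arithmetically, then emits [start + 4*k for k in range(n)] with no per-bar scan.
import Mathlib
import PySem

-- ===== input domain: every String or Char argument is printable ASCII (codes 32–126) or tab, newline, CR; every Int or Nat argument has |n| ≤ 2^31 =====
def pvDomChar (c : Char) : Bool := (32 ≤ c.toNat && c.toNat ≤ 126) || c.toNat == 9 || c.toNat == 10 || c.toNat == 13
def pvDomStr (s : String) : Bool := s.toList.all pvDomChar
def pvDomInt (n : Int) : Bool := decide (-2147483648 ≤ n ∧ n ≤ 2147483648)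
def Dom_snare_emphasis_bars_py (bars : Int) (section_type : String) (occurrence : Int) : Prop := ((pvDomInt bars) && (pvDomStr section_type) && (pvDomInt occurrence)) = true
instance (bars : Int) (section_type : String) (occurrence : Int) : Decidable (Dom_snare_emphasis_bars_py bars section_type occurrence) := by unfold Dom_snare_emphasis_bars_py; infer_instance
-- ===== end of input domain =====

-- B replaces A's per-bar scan with closed-form arithmetic: it computes the first emphasis
-- bar and the number of emphasis bars, then emits them by a comprehension (objective: simpler).

-- ===== PORT A =====
def snare_emphasis_bars_py (bars : Int) (section_type : String) (occurrence : Int) : List Int :=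
  let base_bar : Int := if section_type = "hook" ∨ section_type = "pre_hook" then 3 else 4
  let offset : Int := PySem.Int.mod (occurrence - 1) 4
  (PySem.List.pyRange 1 (bars + 1) 1).foldl
    (fun emphasis_bars bar =>
      let adjusted := bar - offset
      if adjusted > 0 ∧ PySem.Int.mod (adjusted - base_bar) 4 = 0 then
        emphasis_bars ++ [bar]
      else
        emphasis_bars)
    []

-- ===== PORT B =====
def snare_emphasis_bars_py_alt (bars : Int) (section_type : String) (occurrence : Int) : List Int :=
  let start : Int :=
    (if section_type = "hook" ∨ section_type = "pre_hook" then 3 else 4)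
      + PySem.Int.mod (occurrence - 1) 4
  if bars < start then
    []
  else
    let n : Int := PySem.Int.floordiv (bars - start) 4 + 1
    (List.range n.toNat).map (fun k => start + 4 * (k : Int))

-- ===== PRECONDITION & SPEC =====
def Spec_snare_emphasis_bars_py (bars : Int) (section_type : String) (occurrence : Int) (out : List Int) : Prop := out = snare_emphasis_bars_py_alt bars section_type occurrence
instance (bars : Int) (section_type : String) (occurrence : Int) (out : List Int) : Decidable (Spec_snare_emphasis_bars_py bars section_type occurrence out) := by unfold Spec_snare_emphasis_bars_py; infer_instance

-- ===== CLAIM (what is proved, stated in full; the proofs are below) =====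
def Claim_equal_snare_emphasis_bars_py : Prop := ∀ (bars : Int) (section_type : String) (occurrence : Int), Dom_snare_emphasis_bars_py bars section_type occurrence → Spec_snare_emphasis_bars_py bars section_type occurrence (snare_emphasis_bars_py bars section_type occurrence)

-- ===== LEMMAS AND PROOFS =====

-- A filtered step-1 range whose test keeps exactly the bars ≥ base+offset congruent to
-- base+offset mod 4 equals the step-4 range starting at base+offset.
theorem pv_filter_eq_pyRange4 (n base offset : Int)
    (hb : base = 3 ∨ base = 4) (ho : 0 ≤ offset) (ho4 : offset < 4) :
    (PySem.List.pyRange 1 n 1).filter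
      (fun bar => decide (bar - offset > 0 ∧ PySem.Int.mod (bar - offset - base) 4 = 0))
      = PySem.List.pyRange (base + offset) n 4 := by
  have h4 : (0 : Int) < 4 := by norm_num
  have hp1 : ((PySem.List.pyRange 1 n 1).filter
      (fun bar => decide (bar - offset > 0 ∧ PySem.Int.mod (bar - offset - base) 4 = 0))).Pairwise (· < ·) :=
    (PySem.List.pairwise_lt_pyRange_one 1 n).filter _
  have hp2 : (PySem.List.pyRange (base + offset) n 4).Pairwise (· < ·) := by
    rw [PySem.List.pyRange_of_pos _ _ h4]
    refine List.pairwise_map.mpr ?_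
    exact (List.pairwise_lt_range).imp (fun {a b} hab => by omega)
  have hmem : ∀ x : Int,
      (x ∈ (PySem.List.pyRange 1 n 1).filter
        (fun bar => decide (bar - offset > 0 ∧ PySem.Int.mod (bar - offset - base) 4 = 0)))
      ↔ x ∈ PySem.List.pyRange (base + offset) n 4 := by
    intro x
    rw [List.mem_filter, PySem.List.mem_pyRange_one, PySem.List.mem_pyRange_iff_of_pos h4,
      decide_eq_true_iff, PySem.Int.mod_eq_zero_iff_dvd]
    rcases hb with hb | hb <;> subst hb <;> omega
  have hperm := (List.perm_ext_iff_of_nodup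
      (hp1.imp (fun {a b} h => ne_of_lt h)) (hp2.imp (fun {a b} h => ne_of_lt h))).mpr hmem
  apply List.Perm.eq_of_pairwise
    (fun (a b : Int) _ _ (h1 : a < b) (h2 : b < a) => absurd h2 (lt_asymm h1)) <;>
    first
      | exact hperm
      | exact hp1
      | exact hp2

-- The step-4 range from `start` to `bars+1` equals B's count-then-map closed form.
theorem pv_pyRange4_eq_map (bars start : Int) :
    PySem.List.pyRange start (bars + 1) 4 =
      (if bars < start then []
       else (List.range (PySem.Int.floordiv (bars - start) 4 + 1).toNat).map
              (fun k => start + 4 * (k : Int))) := by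
  rw [PySem.List.pyRange_of_pos _ _ (by norm_num : (0:Int) < 4)]
  by_cases h : bars < start
  · rw [if_pos h, if_neg (by omega : ¬ start < bars + 1)]
    simp
  · rw [if_neg h, if_pos (by omega : start < bars + 1),
      PySem.Int.floordiv_eq_ediv_of_pos (by norm_num)]
    have hm : ((bars + 1 - start + 4 - 1) / 4).toNat = ((bars - start) / 4 + 1).toNat := by omega
    rw [hm]
    induction ((bars - start) / 4 + 1).toNat with
    | zero => simp
    | succ m ih => simp [List.range_succ, ih]

-- ===== VERDICT (by name: the statement is the Claim_ definition above) =====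
theorem snare_emphasis_bars_py_spec : Claim_equal_snare_emphasis_bars_py := by
  intro bars section_type occurrence _
  unfold Spec_snare_emphasis_bars_py snare_emphasis_bars_py snare_emphasis_bars_py_alt
  simp only []
  rw [PySem.List.foldl_append_ite_eq_filter, List.nil_append,
    pv_filter_eq_pyRange4 (bars + 1)
      (if section_type = "hook" ∨ section_type = "pre_hook" then 3 else 4)
      (PySem.Int.mod (occurrence - 1) 4)
      (by split <;> simp)
      (PySem.Int.mod_nonneg _ (by norm_num))
      (PySem.Int.mod_lt _ (by norm_num)),
    pv_pyRange4_eq_map]
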